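-- pv_equiv track=rewrite | github.com/Lillthorin/examen_arbete | main.py | group_and_sort_bbox_by_y_center
-- ===== SOURCE A (Python) =====
-- def group_and_sort_bbox_by_y_center(bboxes, y_threshold=5):
--     """
--     Dela upp listan med bboxar i rader baserat på y_centrum och sortera varje rad på x_centrum.
--
--     Args:
--         bboxes (list): En lista med bboxar i formatet [xmin, ymin, xmax, ymax, (x_cen, y_cent)].
--         y_threshold (int): Maximal skillnad mellan y_cent för att tillhöra samma rad.
--
--     Returns:
--         list: En array där varje rad innehåller bboxar sorterade på x_centrum.
--     """
--     from itertools import groupby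
--
--     # Sortera bboxarna baserat på y_cent först
--     bboxes = sorted(bboxes, key=lambda box: box[-1][1])
--
--     # Gruppindelning baserat på y_cent och y_threshold
--     grouped_rows = []
--     current_row = [bboxes[0]]
--
--     for i in range(1, len(bboxes)):
--         current_box = bboxes[i]
--         last_box = current_row[-1]
--
--         # Kolla om skillnaden mellan y_cent är inom y_threshold
--         if abs(current_box[-1][1] - last_box[-1][1]) <= y_threshold:
--             current_row.append(current_box)
--         else:
--             # Sortera raden baserat på x_cent och lägg till i grupperade rader
--             grouped_rows.append(sorted(current_row, key=lambda box: box[-1][0]))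
--             current_row = [current_box]
--
--     #Lägger till sista raden
--     grouped_rows.append(sorted(current_row, key=lambda box: box[-1][0]))
--
--     return grouped_rows
-- ===== SOURCE B (Python) =====
-- def group_and_sort_bbox_by_y_center(bboxes, y_threshold=5):
--     # Sort by y-center, then repeatedly peel off the maximal run whose
--     # consecutive y-gaps stay within the threshold; sort each run by x-center.
--     s = sorted(bboxes, key=lambda box: box[-1][1])
--     rows = []
--     while s:
--         j = 1
--         while j < len(s) and abs(s[j][-1][1] - s[j - 1][-1][1]) <= y_threshold:
--             j += 1
--         rows.append(sorted(s[:j], key=lambda box: box[-1][0]))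
--         s = s[j:]
--     return rows
-- ===== Notes on version B (the rewrite author's own statement) =====
-- stated objective: alternative
-- what changed: A grows one accumulator row inside a single fold with a trailing flush; B repeatedly peels the maximal within-threshold run off the y-sorted list and sorts each peeled run by x, with no accumulator or final flush.
import Mathlib
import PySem

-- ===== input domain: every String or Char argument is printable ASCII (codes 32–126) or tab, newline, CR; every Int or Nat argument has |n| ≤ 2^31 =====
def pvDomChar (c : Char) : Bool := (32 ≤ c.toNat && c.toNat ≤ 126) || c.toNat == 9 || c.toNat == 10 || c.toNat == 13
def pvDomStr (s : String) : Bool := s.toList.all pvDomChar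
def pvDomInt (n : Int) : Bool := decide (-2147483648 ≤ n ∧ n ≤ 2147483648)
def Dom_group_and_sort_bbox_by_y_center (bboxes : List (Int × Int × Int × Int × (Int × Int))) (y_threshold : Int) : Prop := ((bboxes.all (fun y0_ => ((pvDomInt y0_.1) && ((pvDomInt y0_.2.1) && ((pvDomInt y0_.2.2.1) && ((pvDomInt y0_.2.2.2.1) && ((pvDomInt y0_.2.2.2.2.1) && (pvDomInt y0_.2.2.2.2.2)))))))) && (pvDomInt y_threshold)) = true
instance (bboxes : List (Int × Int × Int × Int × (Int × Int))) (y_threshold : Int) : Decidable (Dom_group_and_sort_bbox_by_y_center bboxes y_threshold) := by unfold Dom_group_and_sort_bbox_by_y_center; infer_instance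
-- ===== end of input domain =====

-- B replaces A's single accumulator-row fold by peeling maximal y-runs off the
-- sorted list and sorting each run by x (objective: alternative decomposition);
-- on the empty list A raises IndexError (excluded by Pre_) while B returns [].

-- ===== PORT A =====
-- loop body of A's 'for i in range(1, len(bboxes))': state = (grouped_rows, current_row)
def pvStepA (y_threshold : Int)
    (st : List (List (Int × Int × Int × Int × (Int × Int))) × List (Int × Int × Int × Int × (Int × Int)))
    (current_box : Int × Int × Int × Int × (Int × Int)) :
    List (List (Int × Int × Int × Int × (Int × Int))) × List (Int × Int × Int × Int × (Int × Int)) :=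
  match PySem.List.pyGet? st.2 (-1) with   -- last_box = current_row[-1] (current_row is never empty)
  | some last_box =>
      if |current_box.2.2.2.2.2 - last_box.2.2.2.2.2| ≤ y_threshold then
        (st.1, st.2 ++ [current_box])
      else
        (st.1 ++ [PySem.List.sorted st.2 (fun box => box.2.2.2.2.1)], [current_box])
  | none => st   -- unreachable

def group_and_sort_bbox_by_y_center (bboxes : List (Int × Int × Int × Int × (Int × Int))) (y_threshold : Int) : List (List (Int × Int × Int × Int × (Int × Int))) :=
  match PySem.List.sorted bboxes (fun box => box.2.2.2.2.2) with
  | [] => []   -- Python: 'bboxes[0]' raises IndexError here; excluded by Pre_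
  | b0 :: rest =>
      let st := rest.foldl (pvStepA y_threshold) ([], [b0])
      st.1 ++ [PySem.List.sorted st.2 (fun box => box.2.2.2.2.1)]

-- ===== PORT B =====
-- B's inner while loop: split off the maximal run continuing 'prev' within the threshold
-- (returns (s[:j][1:], s[j:]) of Source B with prev = s[0])
def pvRunB (y_threshold : Int) (prev : Int × Int × Int × Int × (Int × Int)) :
    List (Int × Int × Int × Int × (Int × Int)) →
    List (Int × Int × Int × Int × (Int × Int)) × List (Int × Int × Int × Int × (Int × Int))
  | [] => ([], [])
  | c :: rest =>
      if |c.2.2.2.2.2 - prev.2.2.2.2.2| ≤ y_threshold then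
        let pr := pvRunB y_threshold c rest
        (c :: pr.1, pr.2)
      else ([], c :: rest)

-- B's outer 'while s:' loop; the fuel (started at the list's length, which the
-- remaining suffix never exceeds) only makes the recursion structural
def pvRowsB (y_threshold : Int) :
    Nat → List (Int × Int × Int × Int × (Int × Int)) → List (List (Int × Int × Int × Int × (Int × Int)))
  | _, [] => []
  | 0, _ :: _ => []   -- never reached: fuel ≥ length of the list
  | n + 1, b :: rest =>
      let pr := pvRunB y_threshold b rest
      PySem.List.sorted (b :: pr.1) (fun box => box.2.2.2.2.1) :: pvRowsB y_threshold n pr.2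

def group_and_sort_bbox_by_y_center_alt (bboxes : List (Int × Int × Int × Int × (Int × Int))) (y_threshold : Int) : List (List (Int × Int × Int × Int × (Int × Int))) :=
  let s := PySem.List.sorted bboxes (fun box => box.2.2.2.2.2)
  pvRowsB y_threshold s.length s

-- ===== PRECONDITION & SPEC =====
-- Pre_ excludes only the empty list, on which A raises IndexError at 'bboxes[0]'.
def Pre_group_and_sort_bbox_by_y_center (bboxes : List (Int × Int × Int × Int × (Int × Int))) (y_threshold : Int) : Prop := bboxes ≠ []
instance (bboxes : List (Int × Int × Int × Int × (Int × Int))) (y_threshold : Int) : Decidable (Pre_group_and_sort_bbox_by_y_center bboxes y_threshold) := by unfold Pre_group_and_sort_bbox_by_y_center; infer_instance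

def pvWitness_group_and_sort_bbox_by_y_center : (List (Int × Int × Int × Int × (Int × Int))) × Int :=
  ([(0, 0, 2, 2, (1, 1)), (3, 0, 5, 2, (4, 1)), (0, 10, 2, 12, (1, 11))], 5)

def Spec_group_and_sort_bbox_by_y_center (bboxes : List (Int × Int × Int × Int × (Int × Int))) (y_threshold : Int) (out : List (List (Int × Int × Int × Int × (Int × Int)))) : Prop := out = group_and_sort_bbox_by_y_center_alt bboxes y_threshold
instance (bboxes : List (Int × Int × Int × Int × (Int × Int))) (y_threshold : Int) (out : List (List (Int × Int × Int × Int × (Int × Int)))) : Decidable (Spec_group_and_sort_bbox_by_y_center bboxes y_threshold out) := by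
  unfold Spec_group_and_sort_bbox_by_y_center
  exact @List.hasDecEq _ (fun x y => @List.hasDecEq _ (fun u v => by infer_instance) x y) _ _

-- ===== CLAIM (what is proved, stated in full; the proofs are below) =====
def Claim_equal_group_and_sort_bbox_by_y_center : Prop := ∀ (bboxes : List (Int × Int × Int × Int × (Int × Int))) (y_threshold : Int), Dom_group_and_sort_bbox_by_y_center bboxes y_threshold → Pre_group_and_sort_bbox_by_y_center bboxes y_threshold → Spec_group_and_sort_bbox_by_y_center bboxes y_threshold (group_and_sort_bbox_by_y_center bboxes y_threshold)

-- ===== LEMMAS AND PROOFS =====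
-- the run-splitter only shortens the list
theorem pvRunB_snd_length_le (y_threshold : Int) (prev : Int × Int × Int × Int × (Int × Int))
    (l : List (Int × Int × Int × Int × (Int × Int))) :
    (pvRunB y_threshold prev l).2.length ≤ l.length := by
  induction l generalizing prev with
  | nil => simp [pvRunB]
  | cons c rest ih =>
      simp only [pvRunB]
      split
      · exact Nat.le_succ_of_le (ih c)
      · exact Nat.le_refl _

-- any fuel at least the list's length gives the same rows
theorem pvRowsB_fuel (y_threshold : Int) :
    ∀ (n : Nat) (l : List (Int × Int × Int × Int × (Int × Int))),
      l.length ≤ n → pvRowsB y_threshold n l = pvRowsB y_threshold l.length l := by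
  intro n
  induction n using Nat.strong_induction_on with
  | _ n ih =>
      intro l hn
      cases l with
      | nil => cases n <;> simp [pvRowsB]
      | cons b rest =>
          cases n with
          | zero => simp at hn
          | succ n =>
              simp only [pvRowsB, List.length_cons]
              have h1 : (pvRunB y_threshold b rest).2.length ≤ n :=
                le_trans (pvRunB_snd_length_le _ _ _) (by simpa using hn)
              have h2 : (pvRunB y_threshold b rest).2.length ≤ rest.length :=
                pvRunB_snd_length_le _ _ _
              have hn' : rest.length ≤ n := by simpa using hn
              rw [ih n (by omega) _ h1, ih rest.length (by omega) _ h2]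

-- A's fold, started from any nonempty current row whose last element is p,
-- produces exactly B's peeled rows of the remaining list.
theorem pvFold_eq_rows (y_threshold : Int)
    (rest : List (Int × Int × Int × Int × (Int × Int))) :
    ∀ (g : List (List (Int × Int × Int × Int × (Int × Int))))
      (cur : List (Int × Int × Int × Int × (Int × Int)))
      (p : Int × Int × Int × Int × (Int × Int)), cur.getLast? = some p →
    (let st := rest.foldl (pvStepA y_threshold) (g, cur);
      st.1 ++ [PySem.List.sorted st.2 (fun box => box.2.2.2.2.1)]) =
    g ++ (let pr := pvRunB y_threshold p rest;
      PySem.List.sorted (cur ++ pr.1) (fun box => box.2.2.2.2.1) ::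
        pvRowsB y_threshold pr.2.length pr.2) := by
  induction rest with
  | nil => intro g cur p _; simp [pvRunB, pvRowsB]
  | cons c rest ih =>
      intro g cur p hlast
      simp only [List.foldl_cons, pvRunB]
      have hstep : pvStepA y_threshold (g, cur) c =
          if |c.2.2.2.2.2 - p.2.2.2.2.2| ≤ y_threshold then (g, cur ++ [c])
          else (g ++ [PySem.List.sorted cur (fun box => box.2.2.2.2.1)], [c]) := by
        simp [pvStepA, PySem.List.pyGet?_neg_one, hlast]
      rw [hstep]
      by_cases h : |c.2.2.2.2.2 - p.2.2.2.2.2| ≤ y_threshold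
      · rw [if_pos h, if_pos h]
        have := ih g (cur ++ [c]) c (by simp)
        simp only [List.append_assoc] at this ⊢
        simpa using this
      · rw [if_neg h, if_neg h]
        have := ih (g ++ [PySem.List.sorted cur (fun box => box.2.2.2.2.1)]) [c] c (by simp)
        simp only [this]
        have hf := pvRowsB_fuel y_threshold rest.length
            (pvRunB y_threshold c rest).2 (pvRunB_snd_length_le _ _ _)
        conv_rhs => rw [show (c :: rest).length = rest.length + 1 from rfl, pvRowsB]
        rw [hf]
        simp

-- ===== VERDICT (by name: the statement is the Claim_ definition above) =====
theorem group_and_sort_bbox_by_y_center_spec : Claim_equal_group_and_sort_bbox_by_y_center := by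
  intro bboxes y_threshold _ hpre
  unfold Spec_group_and_sort_bbox_by_y_center
  unfold group_and_sort_bbox_by_y_center group_and_sort_bbox_by_y_center_alt
  have hne : PySem.List.sorted bboxes (fun box => box.2.2.2.2.2) ≠ [] := by
    intro h
    have hp := PySem.List.sorted_perm (xs := bboxes) (key := fun box => box.2.2.2.2.2) (rev := false)
    rw [h] at hp
    exact hpre hp.symm.eq_nil
  cases hs : PySem.List.sorted bboxes (fun box => box.2.2.2.2.2) with
  | nil => exact absurd hs hne
  | cons b0 rest =>
      have := pvFold_eq_rows y_threshold rest [] [b0] b0 (by simp)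
      simp only [List.nil_append] at this
      simp only [this, List.length_cons, pvRowsB, List.cons_append, List.nil_append]
      have hf := pvRowsB_fuel y_threshold rest.length
          (pvRunB y_threshold b0 rest).2 (pvRunB_snd_length_le _ _ _)
      simp [hf]
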